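-- pv_equiv track=rewrite | github.com/ganeshprasadbk/CAD_for_IC_Design | CAD_for_IC_Design/CAD_Algorithm_Library/FlowBased_bipartitioning.py | net_based_flow_network
-- ===== SOURCE A (Python) =====
-- def net_based_flow_network(nets_dict):
--     'Function to convert net list into net based flow graph'
--
--     inverse = {}
--     inverse_sorted = {}
--     for key in nets_dict:                   # Go through the list that is saved in the dict:
--         for item in nets_dict[key]:         # Check if in the inverted dict the key exists
--             if item not in inverse:         # If not create a new list
--                 inverse[item] = [key]
--             else:
--                 inverse[item].append(key)
--     for key, value in sorted(inverse.items()):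
--         inverse_sorted[key]=value
--     inverse_sorted.update(nets_dict.copy())
--     return inverse_sorted
-- ===== SOURCE B (Python) =====
-- def net_based_flow_network(nets_dict):
--     'Function to convert net list into net based flow graph'
--     pairs = [(item, key) for key, items in nets_dict.items() for item in items]
--     pairs.sort(key=lambda p: p[0])          # stable: per-item net order is preserved
--     result = {}
--     i = 0
--     n = len(pairs)
--     while i < n:                            # group consecutive equal items
--         item = pairs[i][0]
--         j = i
--         while j < n and pairs[j][0] == item:
--             j += 1
--         result[item] = [k for _, k in pairs[i:j]]
--         i = j
--     result.update(nets_dict)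
--     return result
-- ===== Notes on version B (the rewrite author's own statement) =====
-- stated objective: alternative
-- what changed: Replaces hash-map inversion followed by sorting the inverse dict's items with building a flat (item, net) pair list, stably sorting it by item, and grouping consecutive equal items into the sorted inverse before overlaying the original dict.
import Mathlib
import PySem

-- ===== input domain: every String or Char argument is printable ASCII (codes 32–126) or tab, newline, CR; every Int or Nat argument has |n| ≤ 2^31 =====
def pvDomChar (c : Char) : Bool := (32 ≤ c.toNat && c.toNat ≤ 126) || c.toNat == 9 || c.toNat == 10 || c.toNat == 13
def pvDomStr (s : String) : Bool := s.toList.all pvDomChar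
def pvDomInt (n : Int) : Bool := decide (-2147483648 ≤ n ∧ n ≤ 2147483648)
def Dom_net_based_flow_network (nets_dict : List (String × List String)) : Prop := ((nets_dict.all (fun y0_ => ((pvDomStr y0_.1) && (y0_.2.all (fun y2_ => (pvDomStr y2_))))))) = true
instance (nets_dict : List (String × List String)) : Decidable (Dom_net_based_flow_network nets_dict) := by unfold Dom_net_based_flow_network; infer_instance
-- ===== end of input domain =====

-- B replaces dict inversion followed by a sort of the inverse's items with a stable sort of a
-- flat (item, net) pair list and one grouping pass (objective: alternative decomposition).

-- ===== PORT A =====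
-- inverse's keys are distinct, so Python's tuple sort sorted(inverse.items())
-- never compares second components: it is the stable sort by the key alone.
def net_based_flow_network (nets_dict : List (String × List String)) : List (String × List String) :=
  let inverse : PySem.Dict String (List String) :=
    nets_dict.foldl (fun inv kv =>
      kv.2.foldl (fun inv item =>
        if inv.contains item = false then inv.insert item [kv.1]
        else inv.modify item [] (fun l => l ++ [kv.1])) inv) PySem.Dict.empty
  let inverse_sorted : PySem.Dict String (List String) :=
    (PySem.List.sorted inverse.items (fun p => p.1) false).foldl
      (fun d p => d.insert p.1 p.2) PySem.Dict.empty
  let final := nets_dict.foldl (fun d p => d.insert p.1 p.2) inverse_sorted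
  final.items

-- ===== PORT B =====
-- the inner `while j < n and pairs[j][0] == item` scan of Source B is the takeWhile
-- (and the advance of i to j the dropWhile) of the consecutive-equal-items group.
def pvGroup : List (String × String) → List (String × List String)
  | [] => []
  | (item, key) :: rest =>
      (item, key :: (rest.takeWhile (fun p => p.1 == item)).map (·.2))
        :: pvGroup (rest.dropWhile (fun p => p.1 == item))
termination_by l => l.length
decreasing_by
  simpa using Nat.lt_succ_of_le (List.length_dropWhile_le _ _)

def net_based_flow_network_alt (nets_dict : List (String × List String)) : List (String × List String) :=
  let pairs : List (String × String) :=
    nets_dict.flatMap (fun kv => kv.2.map (fun item => (item, kv.1)))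
  let sortedPairs := PySem.List.sorted pairs (fun p => p.1) false
  let result : PySem.Dict String (List String) :=
    (pvGroup sortedPairs).foldl (fun d p => d.insert p.1 p.2) PySem.Dict.empty
  let final := nets_dict.foldl (fun d p => d.insert p.1 p.2) result
  final.items

-- ===== PRECONDITION & SPEC =====
-- Pre_: the association list stands for the Python dict argument, whose keys are necessarily
-- distinct; lists with duplicate keys do not represent any input of the Python function.
def Pre_net_based_flow_network (nets_dict : List (String × List String)) : Prop :=
  (nets_dict.map (·.1)).Nodup
instance (nets_dict : List (String × List String)) : Decidable (Pre_net_based_flow_network nets_dict) := by unfold Pre_net_based_flow_network; infer_instance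

def pvWitness_net_based_flow_network : (List (String × List String)) :=
  [("n1", ["a", "b"]), ("n2", ["b", "c"])]

def Spec_net_based_flow_network (nets_dict : List (String × List String)) (out : List (String × List String)) : Prop := out = net_based_flow_network_alt nets_dict
instance (nets_dict : List (String × List String)) (out : List (String × List String)) : Decidable (Spec_net_based_flow_network nets_dict out) := by unfold Spec_net_based_flow_network; infer_instance

-- ===== CLAIM (what is proved, stated in full; the proofs are below) =====
def Claim_equal_net_based_flow_network : Prop := ∀ (nets_dict : List (String × List String)), Dom_net_based_flow_network nets_dict → Pre_net_based_flow_network nets_dict → Spec_net_based_flow_network nets_dict (net_based_flow_network nets_dict)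

-- ===== LEMMAS AND PROOFS =====

theorem stepA_eq (inv : PySem.Dict String (List String)) (item key : String) :
    (if inv.contains item = false then inv.insert item [key]
     else inv.modify item [] (fun l => l ++ [key]))
    = inv.modify item [] (fun l => l ++ [key]) := by
  by_cases h : inv.contains item = false
  · simp [h, PySem.Dict.modify, PySem.Dict.getD_of_not_contains (h := h)]
  · simp [h]

theorem foldl_flat (l : List (String × List String)) (d : PySem.Dict String (List String)) :
    l.foldl (fun inv kv =>
        kv.2.foldl (fun inv item => inv.modify item [] (fun l' => l' ++ [kv.1])) inv) d
      = (l.flatMap (fun kv => kv.2.map (fun item => (item, kv.1)))).foldl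
          (fun d p => d.modify p.1 [] (fun l' => l' ++ [p.2])) d := by
  induction l generalizing d with
  | nil => rfl
  | cons kv t ih => simp [List.flatMap_cons, List.foldl_append, List.foldl_map, ih]

theorem ins_filter (c : String) (x : String × String) :
    ∀ (acc : List (String × String)), acc.Pairwise (fun a b => a.1 ≤ b.1) →
    (PySem.List.insertBy (fun a b => decide (a.1 < b.1)) x acc).filter (fun p => p.1 == c)
      = acc.filter (fun p => p.1 == c) ++ (if x.1 == c then [x] else []) := by
  intro acc
  induction acc with
  | nil => intro _; by_cases h : x.1 = c <;> simp [PySem.List.insertBy, h]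
  | cons y ys ih =>
    intro hp
    rw [PySem.List.insertBy]
    by_cases hlt : x.1 < y.1
    · simp only [hlt, decide_true, if_true]
      by_cases hx : x.1 = c
      · have hnil : (y :: ys).filter (fun p => p.1 == c) = [] := by
          rw [List.filter_eq_nil_iff]
          intro z hz
          have hyz : y.1 ≤ z.1 := by
            rcases List.mem_cons.mp hz with h | h
            · exact h ▸ le_refl _
            · exact (List.pairwise_cons.mp hp).1 z h
          have : c < z.1 := lt_of_lt_of_le (hx ▸ hlt) hyz
          simpa using (ne_of_gt this)
        simp [hnil, hx]
      · simp [hx, List.filter_cons]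
    · simp only [hlt, decide_false, Bool.false_eq_true, if_false]
      rw [List.filter_cons, List.filter_cons, ih (List.Pairwise.of_cons hp)]
      by_cases hy : y.1 = c <;> simp [hy]

theorem filter_sorted (c : String) (pairs : List (String × String)) :
    (PySem.List.sorted pairs (fun p => p.1) false).filter (fun p => p.1 == c)
      = pairs.filter (fun p => p.1 == c) := by
  induction pairs using List.reverseRecOn with
  | nil => rfl
  | append_singleton l x ih =>
    have hstep : PySem.List.sorted (l ++ [x]) (fun p => p.1) false
        = PySem.List.insertBy (fun a b => decide (a.1 < b.1)) x
            (PySem.List.sorted l (fun p => p.1) false) := by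
      rw [PySem.List.sorted_eq_foldl_insertBy, PySem.List.sorted_eq_foldl_insertBy,
        List.foldl_append, List.foldl_cons, List.foldl_nil]
    rw [hstep, ins_filter c x _ (PySem.List.sorted_pairwise l (fun p => p.1)), ih,
      List.filter_append]
    by_cases hx : x.1 = c <;> simp [hx]

theorem dropWhile_gt (item : String) (rest : List (String × String))
    (hp : rest.Pairwise (fun a b => a.1 ≤ b.1))
    (hb : ∀ p ∈ rest, item ≤ p.1) :
    ∀ p ∈ rest.dropWhile (fun p => p.1 == item), item < p.1 := by
  induction rest with
  | nil => simp
  | cons y ys ih =>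
    rw [List.dropWhile_cons]
    by_cases hy : y.1 = item
    · simp only [hy, beq_self_eq_true, if_true]
      exact ih (List.Pairwise.of_cons hp) (fun p hp' => hb p (List.mem_cons_of_mem _ hp'))
    · have hbe : (y.1 == item) = false := beq_eq_false_iff_ne.mpr hy
      simp only [hbe, Bool.false_eq_true, if_false]
      intro p hp'
      have hyi : item < y.1 := lt_of_le_of_ne (hb y (List.mem_cons_self ..)) (Ne.symm hy)
      rcases List.mem_cons.mp hp' with h | h
      · exact h ▸ hyi
      · exact lt_of_lt_of_le hyi ((List.pairwise_cons.mp hp).1 p h)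

theorem pvGroup_char (sp : List (String × String))
    (hp : sp.Pairwise (fun a b => a.1 ≤ b.1)) :
    (pvGroup sp).Pairwise (fun a b => a.1 < b.1)
    ∧ (∀ q ∈ pvGroup sp, q = (q.1, (sp.filter (fun p => p.1 == q.1)).map (·.2)))
    ∧ (∀ k, k ∈ (pvGroup sp).map (·.1) ↔ k ∈ sp.map (·.1)) := by
  induction sp using pvGroup.induct with
  | case1 => simp [pvGroup]
  | case2 item key rest ih =>
    have hrt : rest.Pairwise (fun a b => a.1 ≤ b.1) := List.Pairwise.of_cons hp
    have hb : ∀ p ∈ rest, item ≤ p.1 := by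
      intro p hp'; exact (List.pairwise_cons.mp hp).1 p hp'
    have hdwp : (rest.dropWhile (fun p => p.1 == item)).Pairwise (fun a b => a.1 ≤ b.1) :=
      hrt.sublist (List.dropWhile_sublist _)
    have hgt : ∀ p ∈ rest.dropWhile (fun p => p.1 == item), item < p.1 :=
      dropWhile_gt item rest hrt hb
    obtain ⟨ihA, ihC, ihM⟩ := ih hdwp
    have htw : ∀ p ∈ rest.takeWhile (fun p => p.1 == item), p.1 = item := by
      intro p h; simpa using List.mem_takeWhile_imp h
    have hkeygt : ∀ k ∈ (pvGroup (rest.dropWhile (fun p => p.1 == item))).map (·.1), item < k := by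
      intro k hk
      rcases List.mem_map.mp ((ihM k).mp hk) with ⟨p, hpm, hpe⟩
      exact hpe ▸ hgt p hpm
    have hsplit : rest = rest.takeWhile (fun p => p.1 == item) ++ rest.dropWhile (fun p => p.1 == item) :=
      (List.takeWhile_append_dropWhile).symm
    refine ⟨?_, ?_, ?_⟩
    · rw [pvGroup]
      refine List.pairwise_cons.mpr ⟨?_, ihA⟩
      intro b hb'
      exact hkeygt b.1 (List.mem_map_of_mem hb')
    · rw [pvGroup]
      intro q hq
      rcases List.mem_cons.mp hq with h | h
      · subst h
        have hfr : rest.filter (fun p => p.1 == item) = rest.takeWhile (fun p => p.1 == item) := by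
          conv_lhs => rw [hsplit]
          rw [List.filter_append, List.filter_eq_self.mpr (by intro p h'; simpa using htw p h'),
            List.filter_eq_nil_iff.mpr (by intro p h'; simpa using (ne_of_gt (hgt p h'))),
            List.append_nil]
        simp [hfr]
      · have hqk : item < q.1 := hkeygt q.1 (List.mem_map_of_mem h)
        have h1 : ((item, key) :: rest).filter (fun p => p.1 == q.1)
            = (rest.dropWhile (fun p => p.1 == item)).filter (fun p => p.1 == q.1) := by
          rw [List.filter_cons]
          have : ((item, key).1 == q.1) = false := beq_eq_false_iff_ne.mpr (ne_of_lt hqk)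
          rw [this]
          simp only [Bool.false_eq_true, if_false]
          conv_lhs => rw [hsplit]
          rw [List.filter_append,
            List.filter_eq_nil_iff.mpr (by
              intro p h'
              simpa using (htw p h' ▸ ne_of_lt hqk)),
            List.nil_append]
        rw [h1]
        exact ihC q h
    · rw [pvGroup]
      intro k
      simp only [List.map_cons, List.mem_cons, ihM]
      constructor
      · rintro (h | h)
        · exact Or.inl h
        · rcases List.mem_map.mp h with ⟨p, hpm, hpe⟩
          have hpr : p ∈ rest := by rw [hsplit]; exact List.mem_append_right _ hpm
          exact Or.inr (hpe ▸ List.mem_map_of_mem hpr)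
      · rintro (h | h)
        · exact Or.inl h
        · rcases List.mem_map.mp h with ⟨p, hpm, hpe⟩
          rw [hsplit] at hpm
          rcases List.mem_append.mp hpm with h' | h'
          · exact Or.inl (hpe ▸ (htw p h').symm ▸ rfl)
          · exact Or.inr (hpe ▸ List.mem_map_of_mem h')

theorem items_inverse (pairs : List (String × String)) :
    (pairs.foldl (fun d p => d.modify p.1 [] (fun l => l ++ [p.2])) PySem.Dict.empty).items
      = (PySem.Set.ofList (pairs.map (·.1))).map
          (fun k => (k, (pairs.filter (fun p => p.1 == k)).map (·.2))) := by
  set d := pairs.foldl (fun d p => d.modify p.1 [] (fun l => l ++ [p.2]))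
    (PySem.Dict.empty (κ := String) (ν := List String)) with hd
  have hnd : d.keys.Nodup := by
    rw [hd]
    exact PySem.Dict.nodup_keys_foldl_modify_key pairs (·.1) [] (fun d p => fun l => l ++ [p.2]) _
      PySem.Dict.nodup_keys_empty
  have hk : d.keys = PySem.Set.ofList (pairs.map (·.1)) := by
    rw [hd]
    rw [PySem.Dict.keys_foldl_modify_key]
    simp [PySem.Dict.keys_empty, PySem.Set.update_nil_left]
  have hg : ∀ k, d.getD k [] = (pairs.filter (fun p => p.1 == k)).map (·.2) := by
    intro k
    rw [hd, PySem.Dict.getD_foldl_modify_append]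
    simp [PySem.Dict.getD_empty]
  rw [PySem.Dict.items_eq_map_keys d hnd [], hk]
  exact List.map_congr_left (fun k _ => by rw [hg k])

theorem core_sorted_group (pairs : List (String × String)) :
    PySem.List.sorted
      ((pairs.foldl (fun d p => d.modify p.1 [] (fun l => l ++ [p.2])) PySem.Dict.empty).items)
      (fun p => p.1) false
    = pvGroup (PySem.List.sorted pairs (fun p => p.1) false) := by
  set sp := PySem.List.sorted pairs (fun p => p.1) false with hsp
  obtain ⟨hA, hC, hM⟩ := pvGroup_char sp (PySem.List.sorted_pairwise pairs (fun p => p.1))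
  have hself : pvGroup sp
      = ((pvGroup sp).map (·.1)).map
          (fun k => (k, (pairs.filter (fun p => p.1 == k)).map (·.2))) := by
    rw [List.map_map]
    refine Eq.symm ((List.map_congr_left ?_).trans (List.map_id _))
    intro q hq
    simp only [Function.comp_apply]
    rw [← filter_sorted q.1 pairs, ← hsp, ← hC q hq]; rfl
  have hK'nodup : ((pvGroup sp).map (·.1)).Nodup :=
    (List.pairwise_map.mpr hA).imp (fun h => ne_of_lt h)
  have hKperm : ((pvGroup sp).map (·.1)).Perm (PySem.Set.ofList (pairs.map (·.1))) := by
    rw [List.perm_ext_iff_of_nodup hK'nodup (PySem.Set.nodup_ofList _)]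
    intro k
    rw [hM k, PySem.Set.mem_ofList]
    exact (PySem.List.sorted_perm pairs (fun p => p.1) false).map (·.1) |>.mem_iff
  have hperm : (pvGroup sp).Perm
      ((pairs.foldl (fun d p => d.modify p.1 [] (fun l => l ++ [p.2])) PySem.Dict.empty).items) := by
    rw [items_inverse, hself]
    exact hKperm.map _
  exact PySem.List.sorted_eq_of_perm_of_pairwise_lt _ _ _ hperm hA

-- ===== VERDICT (by name: the statement is the Claim_ definition above) =====
theorem net_based_flow_network_spec : Claim_equal_net_based_flow_network := by
  intro nd _ _
  unfold Spec_net_based_flow_network net_based_flow_network net_based_flow_network_alt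
  dsimp only
  have hstep : (fun (inv : PySem.Dict String (List String)) (kv : String × List String) =>
      kv.2.foldl (fun inv item =>
        if inv.contains item = false then inv.insert item [kv.1]
        else inv.modify item [] (fun l => l ++ [kv.1])) inv)
      = fun inv kv =>
        kv.2.foldl (fun inv item => inv.modify item [] (fun l => l ++ [kv.1])) inv := by
    funext inv kv
    congr 1
    funext inv item
    exact stepA_eq inv item kv.1
  rw [hstep, foldl_flat, core_sorted_group]
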